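-- pv_equiv track=rewrite | github.com/Purtera-IT/SowSmith | app/eval/benchmark.py | _recommended_fixes
-- ===== SOURCE A (Python) =====
-- def _recommended_fixes(failures: list[str]) -> list[str]:
--     fixes: list[str] = []
--     for failure in failures:
--         if "packet_family_recall" in failure:
--             fixes.append("Increase parser robustness for missing packet families in adversarial inputs.")
--         elif "governing_accuracy" in failure:
--             fixes.append("Refine authority lattice penalties/tie-breaks for governing atom selection.")
--         elif "contradiction_recall" in failure:
--             fixes.append("Improve contradiction edge detection and conflict packet generation.")
--         elif "invalid_governance_count" in failure:
--             fixes.append("Tighten governance validators for deleted/rejected/quoted authority constraints.")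
--         elif "determinism_pass" in failure:
--             fixes.append("Remove non-deterministic fields from signatures and enforce stable sorting.")
--         elif "false_active_rate" in failure:
--             fixes.append("Downgrade active contradictory packets to needs_review in packetizer.")
--         elif "compile_success_rate" in failure:
--             fixes.append("Investigate parser crashes and validation hard errors in failing scenarios.")
--     return sorted(set(fixes))
-- ===== SOURCE B (Python) =====
-- _TABLE = [
--     ("packet_family_recall", "Increase parser robustness for missing packet families in adversarial inputs."),
--     ("governing_accuracy", "Refine authority lattice penalties/tie-breaks for governing atom selection."),
--     ("contradiction_recall", "Improve contradiction edge detection and conflict packet generation."),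
--     ("invalid_governance_count", "Tighten governance validators for deleted/rejected/quoted authority constraints."),
--     ("determinism_pass", "Remove non-deterministic fields from signatures and enforce stable sorting."),
--     ("false_active_rate", "Downgrade active contradictory packets to needs_review in packetizer."),
--     ("compile_success_rate", "Investigate parser crashes and validation hard errors in failing scenarios."),
-- ]
--
--
-- def _first_fix(failure):
--     for kw, msg in _TABLE:
--         if kw in failure:
--             return msg
--     return None
--
--
-- def _recommended_fixes(failures: list, ) -> list:
--     # Scan the fixed message universe in sorted order and keep each message
--     # that is the first-match fix of at least one failure.
--     msgs = sorted(msg for _, msg in _TABLE)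
--     return [m for m in msgs if any(_first_fix(f) == m for f in failures)]
-- ===== Notes on version B (the rewrite author's own statement) =====
-- stated objective: alternative
-- what changed: Instead of accumulating a fix per failure through a hard-coded elif chain and then sorting/deduplicating, B scans the fixed universe of fix messages in sorted order and keeps each message for which some failure's first-matching keyword maps to it, so no sort/dedup of an accumulated list is needed.
import Mathlib
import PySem

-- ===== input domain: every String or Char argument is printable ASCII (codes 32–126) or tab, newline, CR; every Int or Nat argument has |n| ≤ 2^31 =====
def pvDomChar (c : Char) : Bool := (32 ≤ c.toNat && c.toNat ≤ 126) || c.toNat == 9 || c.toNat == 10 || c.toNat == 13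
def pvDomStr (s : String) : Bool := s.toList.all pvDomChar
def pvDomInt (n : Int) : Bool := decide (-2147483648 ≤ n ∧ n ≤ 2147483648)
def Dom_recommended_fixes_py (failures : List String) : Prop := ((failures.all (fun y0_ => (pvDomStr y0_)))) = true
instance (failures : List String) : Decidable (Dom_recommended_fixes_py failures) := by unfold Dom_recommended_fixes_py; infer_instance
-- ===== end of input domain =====

-- B replaces A's per-failure elif accumulation + sorted(set(...)) by a first-match
-- table scan over the fixed, sorted message universe (alternative structure, same cost class).

-- ===== PORT A =====
def recommended_fixes_py (failures : List String) : List String :=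
  let fixes : List String := failures.foldl (fun fixes failure =>
    if PySem.Str.isIn "packet_family_recall" failure then
      fixes ++ ["Increase parser robustness for missing packet families in adversarial inputs."]
    else if PySem.Str.isIn "governing_accuracy" failure then
      fixes ++ ["Refine authority lattice penalties/tie-breaks for governing atom selection."]
    else if PySem.Str.isIn "contradiction_recall" failure then
      fixes ++ ["Improve contradiction edge detection and conflict packet generation."]
    else if PySem.Str.isIn "invalid_governance_count" failure then
      fixes ++ ["Tighten governance validators for deleted/rejected/quoted authority constraints."]
    else if PySem.Str.isIn "determinism_pass" failure then
      fixes ++ ["Remove non-deterministic fields from signatures and enforce stable sorting."]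
    else if PySem.Str.isIn "false_active_rate" failure then
      fixes ++ ["Downgrade active contradictory packets to needs_review in packetizer."]
    else if PySem.Str.isIn "compile_success_rate" failure then
      fixes ++ ["Investigate parser crashes and validation hard errors in failing scenarios."]
    else fixes) []
  PySem.List.sorted (PySem.Set.ofList fixes) (fun x => x) false

-- ===== PORT B =====
def pvTable : List (String × String) :=
  [("packet_family_recall", "Increase parser robustness for missing packet families in adversarial inputs."),
   ("governing_accuracy", "Refine authority lattice penalties/tie-breaks for governing atom selection."),
   ("contradiction_recall", "Improve contradiction edge detection and conflict packet generation."),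
   ("invalid_governance_count", "Tighten governance validators for deleted/rejected/quoted authority constraints."),
   ("determinism_pass", "Remove non-deterministic fields from signatures and enforce stable sorting."),
   ("false_active_rate", "Downgrade active contradictory packets to needs_review in packetizer."),
   ("compile_success_rate", "Investigate parser crashes and validation hard errors in failing scenarios.")]

def pvFirstFixGo (failure : String) : List (String × String) → Option String
  | [] => none
  | (kw, msg) :: rest => if PySem.Str.isIn kw failure then some msg else pvFirstFixGo failure rest

def pvFirstFix (failure : String) : Option String := pvFirstFixGo failure pvTable

def recommended_fixes_py_alt (failures : List String) : List String :=
  let msgs := PySem.List.sorted (pvTable.map (fun p => p.2)) (fun x => x) false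
  msgs.filter (fun m => failures.any (fun f => pvFirstFix f == some m))

-- ===== PRECONDITION & SPEC =====
def Spec_recommended_fixes_py (failures : List String) (out : List String) : Prop := out = recommended_fixes_py_alt failures
instance (failures : List String) (out : List String) : Decidable (Spec_recommended_fixes_py failures out) := by unfold Spec_recommended_fixes_py; infer_instance

-- ===== CLAIM (what is proved, stated in full; the proofs are below) =====
def Claim_equal_recommended_fixes_py : Prop := ∀ (failures : List String), Dom_recommended_fixes_py failures → Spec_recommended_fixes_py failures (recommended_fixes_py failures)

-- ===== LEMMAS AND PROOFS =====

-- A's elif chain on one failure appends exactly B's first-match result for that failure.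
theorem pv_step_eq (fixes : List String) (failure : String) :
    (if PySem.Str.isIn "packet_family_recall" failure then
      fixes ++ ["Increase parser robustness for missing packet families in adversarial inputs."]
    else if PySem.Str.isIn "governing_accuracy" failure then
      fixes ++ ["Refine authority lattice penalties/tie-breaks for governing atom selection."]
    else if PySem.Str.isIn "contradiction_recall" failure then
      fixes ++ ["Improve contradiction edge detection and conflict packet generation."]
    else if PySem.Str.isIn "invalid_governance_count" failure then
      fixes ++ ["Tighten governance validators for deleted/rejected/quoted authority constraints."]
    else if PySem.Str.isIn "determinism_pass" failure then
      fixes ++ ["Remove non-deterministic fields from signatures and enforce stable sorting."]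
    else if PySem.Str.isIn "false_active_rate" failure then
      fixes ++ ["Downgrade active contradictory packets to needs_review in packetizer."]
    else if PySem.Str.isIn "compile_success_rate" failure then
      fixes ++ ["Investigate parser crashes and validation hard errors in failing scenarios."]
    else fixes) = fixes ++ (pvFirstFix failure).toList := by
  simp only [pvFirstFix, pvTable, pvFirstFixGo]
  split_ifs <;> simp

-- Membership in A's accumulated fixes list, characterised by B's first-match function.
theorem pv_mem_fold (failures : List String) (acc : List String) (m : String) :
    m ∈ failures.foldl (fun fixes failure => fixes ++ (pvFirstFix failure).toList) acc ↔
      m ∈ acc ∨ ∃ f ∈ failures, pvFirstFix f = some m := by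
  induction failures generalizing acc with
  | nil => simp
  | cons f t ih =>
      simp only [List.foldl_cons, ih, List.mem_append, List.mem_cons]
      cases h : pvFirstFix f <;> simp [h, or_assoc]
      constructor
      · rintro (h1 | h2 | h3)
        · exact Or.inl h1
        · exact Or.inr (Or.inl h2.symm)
        · exact Or.inr (Or.inr h3)
      · rintro (h1 | h2 | h3)
        · exact Or.inl h1
        · exact Or.inr (Or.inl h2.symm)
        · exact Or.inr (Or.inr h3)

-- The seven fix messages listed in ascending order.
def pvMsgsSorted : List String :=
  ["Downgrade active contradictory packets to needs_review in packetizer.",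
   "Improve contradiction edge detection and conflict packet generation.",
   "Increase parser robustness for missing packet families in adversarial inputs.",
   "Investigate parser crashes and validation hard errors in failing scenarios.",
   "Refine authority lattice penalties/tie-breaks for governing atom selection.",
   "Remove non-deterministic fields from signatures and enforce stable sorting.",
   "Tighten governance validators for deleted/rejected/quoted authority constraints."]

-- Any first-match result lies in the message universe.
theorem pv_firstFix_mem (f m : String) (h : pvFirstFix f = some m) :
    m ∈ pvMsgsSorted := by
  simp only [pvFirstFix, pvTable, pvFirstFixGo] at h
  split_ifs at h <;> simp_all [pvMsgsSorted]

-- The sorted message universe is strictly increasing (hence already sorted and duplicate-free).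
theorem pv_msgs_pairwise : pvMsgsSorted.Pairwise (· < ·) := by
  have h : List.Pairwise (· < ·) (pvMsgsSorted.map String.toList) := by decide
  exact (List.pairwise_map.mp h).imp (fun hl => String.lt_iff_toList_lt.mpr hl)

theorem pv_msgs_sorted_eq :
    PySem.List.sorted (pvTable.map (fun p => p.2)) (fun x => x) false = pvMsgsSorted :=
  PySem.List.sorted_eq_of_perm_of_pairwise_lt _ _ _ (by decide) pv_msgs_pairwise

-- ===== VERDICT (by name: the statement is the Claim_ definition above) =====
theorem recommended_fixes_py_spec : Claim_equal_recommended_fixes_py := by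
  intro failures _
  show recommended_fixes_py failures = recommended_fixes_py_alt failures
  unfold recommended_fixes_py recommended_fixes_py_alt
  simp only [pv_step_eq, pv_msgs_sorted_eq]
  apply PySem.List.sorted_eq_of_perm_of_pairwise_lt
  · -- the filtered table column is a permutation of set(fixes): both nodup, same membership
    rw [List.perm_ext_iff_of_nodup (List.Nodup.filter _ pv_msgs_pairwise.nodup)
        (PySem.Set.nodup_ofList _)]
    intro m
    rw [List.mem_filter]
    simp only [List.any_eq_true, beq_iff_eq, PySem.Set.mem_ofList, pv_mem_fold,
      List.not_mem_nil, false_or]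
    constructor
    · rintro ⟨_, f, hf, hm⟩; exact ⟨f, hf, hm⟩
    · rintro ⟨f, hf, hm⟩; exact ⟨pv_firstFix_mem f m hm, f, hf, hm⟩
  · exact List.Pairwise.filter _ pv_msgs_pairwise
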